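-- pv_equiv track=rewrite | github.com/Tensored-Flow/testrepo | toolkit/transforms.py | flatten_nested_groups
-- ===== SOURCE A (Python) =====
-- def flatten_nested_groups(groups):
--     """Flatten a dict of {group: [items]} into a sorted list of unique items.
--
--     Args:
--         groups: Dict mapping group names to lists, e.g. {"A": [3, 1], "B": [2, 1]}
--
--     Returns:
--         Sorted list of unique items, e.g. [1, 2, 3]
--     """
--     all_items = []
--     for group_name in groups:
--         items = groups[group_name]
--         for item in items:
--             all_items.append(item)
--
--     # Remove duplicates (linear scan to preserve first-seen ordering before sort)
--     unique_items = []
--     for item in all_items: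
--         found = False
--         for existing in unique_items:
--             if item == existing:
--                 found = True
--                 break
--         if not found:
--             unique_items.append(item)
--
--     # Sort using insertion sort (avoids external dependency on sort implementation)
--     for i in range(1, len(unique_items)):
--         key = unique_items[i]
--         j = i - 1
--         while j >= 0 and unique_items[j] > key:
--             unique_items[j + 1] = unique_items[j]
--             j -= 1
--         unique_items[j + 1] = key
--
--     return unique_items
-- ===== SOURCE B (Python) =====
-- def flatten_nested_groups(groups):
--     """Flatten a dict of {group: [items]} into a sorted list of unique items."""
--     items = sorted(x for v in groups.values() for x in v)
--     out = []
--     for x in items: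
--         if not out or out[-1] != x:
--             out.append(x)
--     return out
-- ===== Notes on version B (the rewrite author's own statement) =====
-- stated objective: faster
-- what changed: Replace the quadratic linear-scan dedup plus hand-written insertion sort with a single sorted() call followed by one adjacent-duplicate-skipping pass.
import Mathlib
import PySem

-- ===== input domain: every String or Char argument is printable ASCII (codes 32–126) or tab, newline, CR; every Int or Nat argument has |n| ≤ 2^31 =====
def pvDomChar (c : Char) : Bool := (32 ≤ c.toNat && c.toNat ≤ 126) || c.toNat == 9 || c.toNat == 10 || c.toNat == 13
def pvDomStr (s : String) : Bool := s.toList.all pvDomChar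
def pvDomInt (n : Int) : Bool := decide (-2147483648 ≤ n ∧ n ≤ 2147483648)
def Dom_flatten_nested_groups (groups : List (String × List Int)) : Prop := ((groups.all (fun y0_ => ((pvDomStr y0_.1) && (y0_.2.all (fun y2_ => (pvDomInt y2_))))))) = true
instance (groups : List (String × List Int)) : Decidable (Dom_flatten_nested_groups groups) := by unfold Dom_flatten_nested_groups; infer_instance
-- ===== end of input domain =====

-- B replaces A's quadratic linear-scan dedup and hand-written insertion sort with one
-- sorted() call and a single adjacent-duplicate-skipping pass.

-- ===== PORT A =====
-- inner scan 'for existing in unique_items: if item == existing: found = True; break'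
def pvScan (item : Int) : List Int → Bool
  | [] => false
  | e :: rest => if item = e then true else pvScan item rest

-- the 'while j >= 0 and unique_items[j] > key' shifting loop; the Nat argument is j+1
-- (0 means j = -1); returns the shifted list and the final j+1 where key is placed.
def pvShift (key : Int) : Nat → List Int → List Int × Nat
  | 0, l => (l, 0)
  | j + 1, l =>
      let v := l.getD j 0
      if v > key then pvShift key j (l.set (j + 1) v) else (l, j + 1)

-- one iteration of the outer 'for i in range(1, len(unique_items))' loop
def pvSortStep (l : List Int) (i : Int) : List Int :=
  let key := PySem.List.pyGetD l i 0
  let res := pvShift key i.toNat l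
  res.1.set res.2 key

def flatten_nested_groups (groups : List (String × List Int)) : List Int :=
  let d := PySem.Dict.ofList groups
  let all_items := d.keys.foldl
    (fun acc k => (d.getD k []).foldl (fun acc x => acc ++ [x]) acc) []
  let unique_items := all_items.foldl
    (fun u x => if pvScan x u then u else u ++ [x]) []
  (PySem.List.pyRange 1 (PySem.List.len unique_items) 1).foldl pvSortStep unique_items

-- ===== PORT B =====
def flatten_nested_groups_alt (groups : List (String × List Int)) : List Int :=
  let d := PySem.Dict.ofList groups
  let items := PySem.List.sorted (d.values.foldl (fun acc v => acc ++ v) []) (fun x => x) false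
  items.foldl (fun out x => if out = [] ∨ PySem.List.pyGetD out (-1) 0 ≠ x then out ++ [x] else out) []

-- ===== PRECONDITION & SPEC =====
def Spec_flatten_nested_groups (groups : List (String × List Int)) (out : List Int) : Prop := out = flatten_nested_groups_alt groups
instance (groups : List (String × List Int)) (out : List Int) : Decidable (Spec_flatten_nested_groups groups out) := by unfold Spec_flatten_nested_groups; infer_instance

-- ===== CLAIM (what is proved, stated in full; the proofs are below) =====
def Claim_equal_flatten_nested_groups : Prop := ∀ (groups : List (String × List Int)), Dom_flatten_nested_groups groups → Spec_flatten_nested_groups groups (flatten_nested_groups groups)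

-- ===== LEMMAS AND PROOFS =====

-- functional form of one insertion-sort step: insert key after the last element ≤ key
def pvInsR (key : Int) (s : List Int) : List Int := (pvInsRAux key s.reverse).reverse
where
  pvInsRAux (key : Int) : List Int → List Int
  | [] => [key]
  | x :: t => if key < x then x :: pvInsRAux key t else key :: x :: t

theorem pvInsR_nil (key : Int) : pvInsR key [] = [key] := rfl

theorem pvInsR_snoc (key x : Int) (s : List Int) :
    pvInsR key (s ++ [x]) = if key < x then pvInsR key s ++ [x] else s ++ [x, key] := by
  simp only [pvInsR, List.reverse_append, List.reverse_cons, List.reverse_nil, List.nil_append,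
    List.cons_append, pvInsR.pvInsRAux]
  split <;> simp

theorem pvInsR_perm (key : Int) (s : List Int) : (pvInsR key s).Perm (key :: s) := by
  induction s using List.reverseRecOn with
  | nil => simp [pvInsR_nil]
  | append_singleton s x ih =>
      rw [pvInsR_snoc]
      split
      · calc (pvInsR key s ++ [x]).Perm ((key :: s) ++ [x]) := ih.append_right _
          _ = key :: (s ++ [x]) := rfl
      · have h := List.perm_middle (a := key) (l₁ := s ++ [x]) (l₂ := ([] : List Int))
        simpa using h

theorem pvInsR_length (key : Int) (s : List Int) : (pvInsR key s).length = s.length + 1 :=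
  (pvInsR_perm key s).length_eq

theorem pvInsR_pairwise (key : Int) (s : List Int) (h : s.Pairwise (· ≤ ·)) :
    (pvInsR key s).Pairwise (· ≤ ·) := by
  induction s using List.reverseRecOn with
  | nil => simp [pvInsR_nil]
  | append_singleton s x ih =>
      rw [List.pairwise_append] at h
      obtain ⟨hs, -, hle⟩ := h
      rw [pvInsR_snoc]
      split
      · rename_i hlt
        rw [List.pairwise_append]
        refine ⟨ih hs, by simp, ?_⟩
        intro a ha b hb
        rcases List.mem_cons.mp ((pvInsR_perm key s).mem_iff.mp ha) with rfl | ha'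
        · simp at hb; omega
        · simpa [List.mem_singleton.mp hb] using hle a ha' x (by simp)
      · rename_i hge
        rw [List.append_cons, List.pairwise_append]
        refine ⟨List.pairwise_append.mpr ⟨hs, by simp, by simpa using hle⟩, by simp, ?_⟩
        intro a ha b hb
        rw [List.mem_singleton.mp hb]
        rcases List.mem_append.mp ha with ha' | ha'
        · exact le_trans (hle a ha' x (by simp)) (by omega)
        · simp at ha'; omega

-- the shifting loop followed by the final write IS pvInsR, for ANY prefix s
theorem pvShift_spec (key : Int) : ∀ (s : List Int) (junk : Int) (r : List Int),
    (pvShift key s.length (s ++ junk :: r)).1.set (pvShift key s.length (s ++ junk :: r)).2 key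
      = pvInsR key s ++ r := by
  intro s
  induction s using List.reverseRecOn with
  | nil => intro junk r; simp [pvShift, pvInsR_nil]
  | append_singleton s x ih =>
      intro junk r
      have hlen : (s ++ [x]).length = s.length + 1 := by simp
      have hget : ((s ++ [x]) ++ junk :: r).getD s.length 0 = x := by
        rw [List.getD_eq_getElem?_getD]
        simp [List.append_assoc]
      rw [hlen, pvShift, hget]
      by_cases hlt : x > key
      · have hset : (((s ++ [x]) ++ junk :: r).set (s.length + 1) x) = s ++ x :: (x :: r) := by
          have h2 : (s ++ [x]) ++ junk :: r = s ++ x :: junk :: r := by simp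
          rw [h2, List.set_append_right _ _ (by omega)]
          simp
        rw [if_pos hlt, hset]
        have h3 := ih x (x :: r)
        rw [h3, pvInsR_snoc, if_pos hlt]
        simp
      · rw [if_neg hlt]
        have h4 : (((s ++ [x]) ++ junk :: r).set (s.length + 1) key) = s ++ [x, key] ++ r := by
          have h2 : (s ++ [x]) ++ junk :: r = s ++ x :: junk :: r := by simp
          rw [h2, List.set_append_right _ _ (by omega)]
          simp
        rw [h4, pvInsR_snoc, if_neg (by omega)]

-- the outer for-loop over range(len s, len s + len r) folds pvInsR over r
theorem pvSort_loop (r : List Int) : ∀ (s : List Int),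
    (PySem.List.pyRange (s.length : Int) ((s.length : Int) + (r.length : Int)) 1).foldl pvSortStep (s ++ r)
      = r.foldl (fun acc x => pvInsR x acc) s := by
  induction r with
  | nil =>
      intro s
      simp [PySem.List.pyRange]
  | cons x r' ih =>
      intro s
      have hcons : PySem.List.pyRange (s.length : Int) ((s.length : Int) + ((x :: r').length : Int)) 1
          = (s.length : Int) :: PySem.List.pyRange ((s.length : Int) + 1) ((s.length : Int) + ((x :: r').length : Int)) 1 := by
        apply PySem.List.pyRange_one_cons
        simp only [List.length_cons]; push_cast; omega
      rw [hcons, List.foldl_cons]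
      have hstep : pvSortStep (s ++ x :: r') (s.length : Int) = pvInsR x s ++ r' := by
        unfold pvSortStep
        have hkey : PySem.List.pyGetD (s ++ x :: r') (s.length : Int) 0 = x := by
          rw [PySem.List.pyGetD_natCast, List.getD_eq_getElem?_getD]
          simp
        rw [hkey]
        have ht : ((s.length : Int)).toNat = s.length := by simp
        rw [ht]
        exact pvShift_spec x s x r'
      rw [hstep]
      have hib := ih (pvInsR x s)
      rw [pvInsR_length] at hib
      have hb : (s.length : Int) + ((x :: r').length : Int) = ((s.length + 1 : Nat) : Int) + (r'.length : Int) := by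
        simp only [List.length_cons]; push_cast; ring
      rw [hb]
      exact hib

-- A's sort phase, started at i = 1, is the pvInsR fold from the empty accumulator
theorem pvSortA_eq (U : List Int) :
    (PySem.List.pyRange 1 (PySem.List.len U) 1).foldl pvSortStep U
      = U.foldl (fun acc x => pvInsR x acc) [] := by
  cases U with
  | nil => rfl
  | cons u U' =>
      have h1 := pvSort_loop U' [u]
      simp only [List.length_singleton, Nat.cast_one, List.singleton_append] at h1
      have h2 : PySem.List.len (u :: U') = (1 : Int) + (U'.length : Int) := by
        simp [PySem.List.len_eq]; ring
      rw [h2, h1, List.foldl_cons, pvInsR_nil]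

-- pvScan is membership
theorem pvScan_eq (item : Int) (u : List Int) : pvScan item u = decide (item ∈ u) := by
  induction u with
  | nil => simp [pvScan]
  | cons e rest ih => by_cases h : item = e <;> simp [pvScan, h, ih]

-- the first-seen dedup loop: nodup and membership
theorem pvDedup_spec (L : List Int) : ∀ (u : List Int), u.Nodup →
    (L.foldl (fun u x => if pvScan x u then u else u ++ [x]) u).Nodup ∧
    ∀ a, a ∈ (L.foldl (fun u x => if pvScan x u then u else u ++ [x]) u) ↔ (a ∈ u ∨ a ∈ L) := by
  induction L with
  | nil => intro u hu; simpa using hu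
  | cons x L' ih =>
      intro u hu
      rw [List.foldl_cons]
      by_cases hx : x ∈ u
      · rw [pvScan_eq, if_pos (by simpa)]
        obtain ⟨h1, h2⟩ := ih u hu
        refine ⟨h1, fun a => ?_⟩
        rw [h2 a]
        constructor
        · rintro (h | h) <;> simp_all
        · rintro (h | h)
          · exact Or.inl h
          · rcases List.mem_cons.mp h with rfl | h' <;> [exact Or.inl hx; exact Or.inr h']
      · rw [pvScan_eq, if_neg (by simpa)]
        obtain ⟨h1, h2⟩ := ih (u ++ [x])
          (by simp [List.nodup_append, hu]; rintro a ha rfl; exact hx ha)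
        refine ⟨h1, fun a => ?_⟩
        rw [h2 a]
        simp [or_assoc]

-- folding pvInsR: permutation and sortedness
theorem pvIsort_perm (U : List Int) : ∀ (s : List Int),
    (U.foldl (fun acc x => pvInsR x acc) s).Perm (s ++ U) := by
  induction U with
  | nil => simp
  | cons x U' ih =>
      intro s
      rw [List.foldl_cons]
      refine (ih (pvInsR x s)).trans ?_
      refine (((pvInsR_perm x s).append_right U')).trans ?_
      exact (List.perm_middle).symm

theorem pvIsort_pairwise (U : List Int) : ∀ (s : List Int), s.Pairwise (· ≤ ·) →
    (U.foldl (fun acc x => pvInsR x acc) s).Pairwise (· ≤ ·) := by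
  induction U with
  | nil => intro s hs; simpa using hs
  | cons x U' ih => intro s hs; exact ih _ (pvInsR_pairwise x s hs)

-- a member of a ≤-pairwise list is at most its last element
theorem pvLe_getLast (l : List Int) (x : Int) (h : l.Pairwise (· ≤ ·)) (hx : x ∈ l)
    (hne : l ≠ []) : x ≤ l.getLast hne := by
  induction l using List.reverseRecOn with
  | nil => simp at hx
  | append_singleton s m ih =>
      rw [List.getLast_concat]
      rw [List.pairwise_append] at h
      rcases List.mem_append.mp hx with hx' | hx'
      · exact h.2.2 x hx' m (by simp)
      · simp at hx'; omega

-- the adjacent-dedup loop of B: pairwise, nodup, membership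
theorem pvAdj_spec (S : List Int) : ∀ (out : List Int), (out ++ S).Pairwise (· ≤ ·) → out.Nodup →
    (S.foldl (fun out x => if out = [] ∨ PySem.List.pyGetD out (-1) 0 ≠ x then out ++ [x] else out) out).Pairwise (· ≤ ·) ∧
    (S.foldl (fun out x => if out = [] ∨ PySem.List.pyGetD out (-1) 0 ≠ x then out ++ [x] else out) out).Nodup ∧
    ∀ a, a ∈ (S.foldl (fun out x => if out = [] ∨ PySem.List.pyGetD out (-1) 0 ≠ x then out ++ [x] else out) out) ↔ (a ∈ out ∨ a ∈ S) := by
  induction S with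
  | nil =>
      intro out hpw hnd
      rw [List.pairwise_append] at hpw
      exact ⟨hpw.1, hnd, by simp⟩
  | cons x S' ih =>
      intro out hpw hnd
      rw [List.foldl_cons]
      by_cases hc : out = [] ∨ PySem.List.pyGetD out (-1) 0 ≠ x
      · rw [if_pos hc]
        have hassoc : (out ++ [x]) ++ S' = out ++ x :: S' := by simp
        have hxnot : x ∉ out := by
          rcases hc with hc | hc
          · simp [hc]
          · intro hmem
            rcases List.eq_nil_or_concat out with rfl | _
            · simp at hmem
            · have hne : out ≠ [] := by rintro rfl; simp at hmem
              rw [PySem.List.pyGetD_neg_one out 0 hne] at hc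
              rw [List.pairwise_append] at hpw
              have h1 : x ≤ out.getLast hne := pvLe_getLast out x hpw.1 hmem hne
              have h2 : out.getLast hne ≤ x :=
                hpw.2.2 _ (List.getLast_mem hne) x (by simp)
              exact hc (by omega)
        obtain ⟨g1, g2, g3⟩ := ih (out ++ [x]) (by rw [hassoc]; exact hpw)
          (by simp [List.nodup_append, hnd]; rintro a ha rfl; exact hxnot ha)
        refine ⟨g1, g2, fun a => ?_⟩
        rw [g3 a]
        simp [or_assoc]
      · rw [if_neg hc]
        rw [not_or, not_ne_iff] at hc
        obtain ⟨hne, heq⟩ := hc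
        rw [PySem.List.pyGetD_neg_one out 0 hne] at heq
        have hxin : x ∈ out := heq ▸ List.getLast_mem hne
        obtain ⟨g1, g2, g3⟩ := ih out
          (List.Pairwise.sublist (List.Sublist.append_left (List.sublist_cons_self x S') out) hpw) hnd
        refine ⟨g1, g2, fun a => ?_⟩
        rw [g3 a]
        constructor
        · rintro (h | h)
          · exact Or.inl h
          · exact Or.inr (List.mem_cons_of_mem x h)
        · rintro (h | h)
          · exact Or.inl h
          · rcases List.mem_cons.mp h with rfl | h'
            · exact Or.inl hxin
            · exact Or.inr h'

-- ===== VERDICT (by name: the statement is the Claim_ definition above) =====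
theorem flatten_nested_groups_spec : Claim_equal_flatten_nested_groups := by
  intro groups _
  unfold Spec_flatten_nested_groups flatten_nested_groups flatten_nested_groups_alt
  simp only [PySem.List.foldl_append_singleton_eq_self]
  set d := PySem.Dict.ofList groups with hd
  have hnd : d.keys.Nodup := PySem.Dict.nodup_keys_ofList groups
  have hflat : d.keys.foldl (fun acc k => acc ++ d.getD k []) [] = d.values.foldl (fun acc v => acc ++ v) [] := by
    rw [PySem.Dict.values_eq_map_keys d hnd [], List.foldl_map]
  rw [hflat]
  set L := d.values.foldl (fun acc v => acc ++ v) [] with hL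
  set U := L.foldl (fun u x => if pvScan x u then u else u ++ [x]) [] with hU
  set S := PySem.List.sorted L (fun x => x) false with hS
  obtain ⟨hUnd, hUmem⟩ := pvDedup_spec L [] (by simp)
  rw [pvSortA_eq]
  -- A side
  have hApw := pvIsort_pairwise U [] (by simp)
  have hAperm : (U.foldl (fun acc x => pvInsR x acc) []).Perm U := by
    simpa using pvIsort_perm U []
  have hAnd : (U.foldl (fun acc x => pvInsR x acc) []).Nodup := hAperm.nodup_iff.mpr hUnd
  -- B side
  have hSpw : ([] ++ S).Pairwise (· ≤ ·) := by
    simpa using PySem.List.sorted_pairwise (xs := L) (key := fun x => x)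
  obtain ⟨hBpw, hBnd, hBmem⟩ := pvAdj_spec S [] hSpw (by simp)
  -- both have the members of L
  have hmem : ∀ a, a ∈ (U.foldl (fun acc x => pvInsR x acc) [])
      ↔ a ∈ (S.foldl (fun out x => if out = [] ∨ PySem.List.pyGetD out (-1) 0 ≠ x then out ++ [x] else out) []) := by
    intro a
    rw [hAperm.mem_iff, hUmem a, hBmem a]
    simp [hS, PySem.List.mem_sorted]
  exact List.Perm.eq_of_pairwise (fun a b _ _ h1 h2 => le_antisymm h1 h2) hApw hBpw
    ((List.perm_ext_iff_of_nodup hAnd hBnd).mpr hmem)
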